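-- pv_equiv track=rewrite | github.com/sangheonEN/segmentation_tf_v1_fcn | util.py | patch_num
-- ===== SOURCE A (Python) =====
-- def patch_num(input_size, patch_size, overlay_size):
--     # patch num count
--     x = 0
--     count_patch = 0
--     for i in range(100):
--         c = x + patch_size
--         x += patch_size - overlay_size
--         count_patch += 1
--         if input_size < c:
--             break
--
--     return count_patch
-- ===== SOURCE B (Python) =====
-- def patch_num(input_size, patch_size, overlay_size):
--     # Closed form: the loop breaks at the first i (0-based) with
--     # input_size < i*step + patch_size, returning i+1, capped at 100 iterations.
--     step = patch_size - overlay_size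
--     if input_size < patch_size:
--         return 1
--     if step <= 0:
--         return 100
--     return min((input_size - patch_size) // step + 2, 100)
-- ===== Notes on version B (the rewrite author's own statement) =====
-- stated objective: faster
-- what changed: Replaced the 100-iteration counting loop by a closed-form ceiling computed with one floor division (with the input_size < patch_size and step <= 0 corners handled directly).
import Mathlib
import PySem

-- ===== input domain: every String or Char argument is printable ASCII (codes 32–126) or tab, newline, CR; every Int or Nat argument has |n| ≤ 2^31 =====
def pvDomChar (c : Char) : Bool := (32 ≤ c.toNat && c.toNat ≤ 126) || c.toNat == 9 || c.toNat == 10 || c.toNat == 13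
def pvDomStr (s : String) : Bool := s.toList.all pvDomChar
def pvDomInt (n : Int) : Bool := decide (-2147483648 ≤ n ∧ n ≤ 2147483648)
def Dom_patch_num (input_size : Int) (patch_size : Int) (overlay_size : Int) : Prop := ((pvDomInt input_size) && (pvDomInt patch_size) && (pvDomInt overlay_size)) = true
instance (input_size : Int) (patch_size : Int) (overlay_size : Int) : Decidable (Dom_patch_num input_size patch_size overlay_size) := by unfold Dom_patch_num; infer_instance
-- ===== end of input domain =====

-- B replaces A's bounded counting loop by a closed-form floor-division formula (objective: faster, O(1)).

-- ===== PORT A =====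
-- the 'for i in range(100)' loop with state (x, count_patch); fuel = remaining iterations
def patchGo (input_size : Int) (patch_size : Int) (overlay_size : Int) :
    Nat → Int → Int → Int
  | 0, _, count => count
  | n + 1, x, count =>
    let c := x + patch_size
    let x' := x + (patch_size - overlay_size)
    let count' := count + 1
    if input_size < c then count'
    else patchGo input_size patch_size overlay_size n x' count'

def patch_num (input_size : Int) (patch_size : Int) (overlay_size : Int) : Int :=
  patchGo input_size patch_size overlay_size 100 0 0

-- ===== PORT B =====
def patch_num_alt (input_size : Int) (patch_size : Int) (overlay_size : Int) : Int :=
  let step := patch_size - overlay_size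
  if input_size < patch_size then 1
  else if step ≤ 0 then 100
  else min (PySem.Int.floordiv (input_size - patch_size) step + 2) 100

-- ===== PRECONDITION & SPEC =====
def Spec_patch_num (input_size : Int) (patch_size : Int) (overlay_size : Int) (out : Int) : Prop := out = patch_num_alt input_size patch_size overlay_size
instance (input_size : Int) (patch_size : Int) (overlay_size : Int) (out : Int) : Decidable (Spec_patch_num input_size patch_size overlay_size out) := by unfold Spec_patch_num; infer_instance

-- ===== CLAIM (what is proved, stated in full; the proofs are below) =====
def Claim_equal_patch_num : Prop := ∀ (input_size : Int) (patch_size : Int) (overlay_size : Int), Dom_patch_num input_size patch_size overlay_size → Spec_patch_num input_size patch_size overlay_size (patch_num input_size patch_size overlay_size)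

-- ===== LEMMAS AND PROOFS =====

-- step ≤ 0 and no break at the current position ⇒ the loop never breaks: exhausts its fuel
theorem patchGo_no_break (i p o : Int) (h : p - o ≤ 0) :
    ∀ (n : Nat) (x count : Int), ¬ i < x + p →
      patchGo i p o n x count = count + n := by
  intro n
  induction n with
  | zero => intro x count _; simp [patchGo]
  | succ n ih =>
    intro x count hx
    simp only [patchGo, if_neg hx]
    rw [ih (x + (p - o)) (count + 1) (by omega)]
    push_cast; ring

-- step > 0 ⇒ the loop runs exactly min n (K+1) iterations, where K is the number of
-- full steps needed: K = 0 if it breaks immediately, else (i - p - x)/step + 1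
theorem patchGo_pos (i p o : Int) (h : 0 < p - o) :
    ∀ (n : Nat) (x count : Int),
      patchGo i p o n x count =
        count + min (n : Int)
          ((if i < x + p then 0 else (i - p - x) / (p - o) + 1) + 1) := by
  intro n
  induction n with
  | zero =>
    intro x count
    have : (0:Int) ≤ (if i < x + p then 0 else (i - p - x) / (p - o) + 1) + 1 := by
      split_ifs with hb
      · omega
      · have : 0 ≤ (i - p - x) / (p - o) := Int.ediv_nonneg (by omega) (by omega)
        omega
    simp [patchGo]; omega
  | succ n ih =>
    intro x count
    simp only [patchGo]
    split_ifs with hb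
    · push_cast; omega
    · rw [ih]
      have hx : x ≤ i - p := by omega
      by_cases hb2 : i < x + (p - o) + p
      · -- next iteration breaks: (i - p - x) / step = 0
        rw [if_pos hb2]
        have h0 : (i - p - x) / (p - o) = 0 :=
          Int.ediv_eq_zero_of_lt (by omega) (by omega)
        rw [h0]; push_cast; omega
      · rw [if_neg hb2]
        have key : (i - p - (x + (p - o))) / (p - o) = (i - p - x) / (p - o) - 1 := by
          have e : i - p - (x + (p - o)) = i - p - x + (-1) * (p - o) := by ring
          rw [e, Int.add_mul_ediv_right (i - p - x) (-1) (show p - o ≠ 0 by omega)]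
          ring
        rw [key]
        have hge : 1 ≤ (i - p - x) / (p - o) := by
          have : ((1:Int)) * (p - o) ≤ i - p - x := by omega
          calc (1:Int) = (1 * (p - o)) / (p - o) := by
                rw [Int.mul_ediv_cancel _ (by omega)]
            _ ≤ (i - p - x) / (p - o) := Int.ediv_le_ediv (by omega) this
        push_cast; omega

-- ===== VERDICT (by name: the statement is the Claim_ definition above) =====
theorem patch_num_spec : Claim_equal_patch_num := by
  intro i p o _
  unfold Spec_patch_num patch_num patch_num_alt
  by_cases h1 : i < p
  · simp [patchGo, if_pos (show i < 0 + p by omega), h1]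
  · rw [if_neg h1]
    by_cases h2 : p - o ≤ 0
    · rw [if_pos h2, patchGo_no_break i p o h2 100 0 0 (by omega)]
      norm_num
    · have hpos : 0 < p - o := by omega
      rw [if_neg h2, patchGo_pos i p o hpos 100 0 0]
      rw [PySem.Int.floordiv_eq_ediv_of_pos (h := hpos)]
      rw [if_neg (by omega : ¬ i < 0 + p)]
      have : i - p - 0 = i - p := by ring
      rw [this]
      omega
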